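-- pv_equiv track=rewrite | github.com/JSYoo5B/TIL | PS/BOJ/17071/17071.py | predict_runner_poses
-- ===== SOURCE A (Python) =====
-- POS_LIMIT = 500000
--
-- def predict_runner_poses(runner_pos):
--     predicts = [ ]
--     pred_pos = runner_pos
--     time_elapsed = 0
--     while True:
--         pred_pos += time_elapsed
--         if pred_pos > POS_LIMIT:
--             break
--         predicts.append(pred_pos)
--         time_elapsed += 1
--     return predicts
-- ===== SOURCE B (Python) =====
-- POS_LIMIT = 500000
--
-- def predict_runner_poses(runner_pos):
--     d = POS_LIMIT - runner_pos
--     if d < 0: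
--         return []
--     # binary search the largest n with the n-th triangular number <= d
--     lo, hi = 0, d + 1  # invariant: tri(lo) <= d < tri(hi)
--     while hi - lo > 1:
--         mid = (lo + hi) // 2
--         if mid * (mid + 1) // 2 <= d:
--             lo = mid
--         else:
--             hi = mid
--     return [runner_pos + i * (i + 1) // 2 for i in range(lo + 1)]
-- ===== Notes on version B (the rewrite author's own statement) =====
-- stated objective: alternative
-- what changed: Replaces the running accumulator loop (pos += t; append) with a closed-form construction: binary-search the largest index n whose triangular number keeps runner_pos + n(n+1)/2 within POS_LIMIT, then build the list in one comprehension of runner_pos + i(i+1)//2 over range(n+1).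
import Mathlib
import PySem

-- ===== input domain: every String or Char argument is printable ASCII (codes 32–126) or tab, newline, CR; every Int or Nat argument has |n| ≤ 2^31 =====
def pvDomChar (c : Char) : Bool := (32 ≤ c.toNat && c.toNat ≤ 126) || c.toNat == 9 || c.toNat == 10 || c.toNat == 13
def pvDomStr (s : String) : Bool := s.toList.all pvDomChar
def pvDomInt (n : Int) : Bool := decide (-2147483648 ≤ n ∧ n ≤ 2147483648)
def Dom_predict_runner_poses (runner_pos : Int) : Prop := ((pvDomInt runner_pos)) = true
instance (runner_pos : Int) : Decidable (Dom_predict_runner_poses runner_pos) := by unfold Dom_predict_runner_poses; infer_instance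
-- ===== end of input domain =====

-- B replaces A's running-accumulator loop by a binary search for the largest valid
-- triangular index plus one closed-form comprehension (objective: alternative).

-- ===== PORT A =====
def pvPOS_LIMIT : Int := 500000

-- the 'while True' loop of A; the Nat fuel only makes the loop total (it is
-- chosen large enough at the call site that the 0 case is never reached)
def pvLoopA : Nat → Int → Int → List Int → List Int
  | 0, _, _, acc => acc
  | fuel + 1, p, t, acc =>
    if p + t > pvPOS_LIMIT then acc
    else pvLoopA fuel (p + t) (t + 1) (acc ++ [p + t])

def predict_runner_poses (runner_pos : Int) : List Int :=
  pvLoopA ((pvPOS_LIMIT + 1 - runner_pos).toNat + 1) runner_pos 0 []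

-- ===== PORT B =====
-- binary search: largest n in [lo, hi) with n*(n+1)//2 <= d, under tri(lo) <= d < tri(hi);
-- the Nat fuel only makes the loop total (the caller passes enough for the halving to finish)
def pvBsearch : Nat → Int → Int → Int → Int
  | 0, _, lo, _ => lo
  | fuel + 1, d, lo, hi =>
    if hi - lo > 1 then
      let mid := PySem.Int.floordiv (lo + hi) 2
      if PySem.Int.floordiv (mid * (mid + 1)) 2 ≤ d then pvBsearch fuel d mid hi
      else pvBsearch fuel d lo mid
    else lo

def predict_runner_poses_alt (runner_pos : Int) : List Int :=
  let d := pvPOS_LIMIT - runner_pos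
  if d < 0 then []
  else
    let lo := pvBsearch (d + 1).toNat d 0 (d + 1)
    (PySem.List.pyRange 0 (lo + 1) 1).map
      (fun i => runner_pos + PySem.Int.floordiv (i * (i + 1)) 2)

-- ===== PRECONDITION & SPEC =====
def Spec_predict_runner_poses (runner_pos : Int) (out : List Int) : Prop := out = predict_runner_poses_alt runner_pos
instance (runner_pos : Int) (out : List Int) : Decidable (Spec_predict_runner_poses runner_pos out) := by unfold Spec_predict_runner_poses; infer_instance

-- ===== CLAIM (what is proved, stated in full; the proofs are below) =====
def Claim_equal_predict_runner_poses : Prop := ∀ (runner_pos : Int), Dom_predict_runner_poses runner_pos → Spec_predict_runner_poses runner_pos (predict_runner_poses runner_pos)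

-- ===== LEMMAS AND PROOFS =====

-- the m-th triangular number as B computes it
def pvTri (m : Int) : Int := PySem.Int.floordiv (m * (m + 1)) 2

lemma pvTri_exact (m : Int) : 2 * pvTri m = m * (m + 1) := by
  have he : Even (m * (m + 1)) := Int.even_mul_succ_self m
  rw [pvTri, PySem.Int.floordiv_eq_ediv_of_pos (by omega)]
  rcases he with ⟨k, hk⟩
  omega

lemma pvTri_succ (m : Int) : pvTri (m + 1) = pvTri m + (m + 1) := by
  have h1 := pvTri_exact m
  have h2 := pvTri_exact (m + 1)
  nlinarith

lemma pvTri_zero : pvTri 0 = 0 := by decide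

lemma pvTri_mono {a b : Int} (ha : 0 ≤ a) (hab : a ≤ b) : pvTri a ≤ pvTri b := by
  have h1 := pvTri_exact a
  have h2 := pvTri_exact b
  nlinarith

lemma pvTri_big (d : Int) (hd : 0 ≤ d) : d < pvTri (d + 1) := by
  have h := pvTri_exact (d + 1)
  nlinarith

lemma pvTri_ge_self (m : Int) (hm : 0 ≤ m) : m ≤ pvTri m := by
  have h := pvTri_exact m
  rcases eq_or_lt_of_le hm with h0 | h1
  · rw [← h0, pvTri_zero]
  · have h2 : m * 1 ≤ m * m := mul_le_mul_of_nonneg_left (by omega) (by omega)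
    nlinarith

lemma pvBsearch_unfold (fuel : ℕ) (d lo hi : Int) : pvBsearch (fuel + 1) d lo hi =
    if hi - lo > 1 then
      (if PySem.Int.floordiv (PySem.Int.floordiv (lo + hi) 2 * (PySem.Int.floordiv (lo + hi) 2 + 1)) 2 ≤ d
       then pvBsearch fuel d (PySem.Int.floordiv (lo + hi) 2) hi
       else pvBsearch fuel d lo (PySem.Int.floordiv (lo + hi) 2))
    else lo := rfl

lemma pvBsearch_spec (d : Int) : ∀ (fuel : ℕ) (lo hi : Int), (hi - lo).toNat ≤ fuel + 1 →
    0 ≤ lo → lo < hi → pvTri lo ≤ d → d < pvTri hi →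
    0 ≤ pvBsearch fuel d lo hi ∧ pvTri (pvBsearch fuel d lo hi) ≤ d ∧
      d < pvTri (pvBsearch fuel d lo hi + 1) := by
  intro fuel
  induction fuel with
  | zero =>
    intro lo hi hm h0 hlt hlo hhi
    have he : hi = lo + 1 := by omega
    exact ⟨h0, hlo, by rw [pvBsearch]; exact he ▸ hhi⟩
  | succ fuel ih =>
    intro lo hi hm h0 hlt hlo hhi
    have hmd : PySem.Int.floordiv (lo + hi) 2 = (lo + hi) / 2 :=
      PySem.Int.floordiv_eq_ediv_of_pos (by omega)
    rw [pvBsearch_unfold]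
    split_ifs with h1 h2
    · exact ih _ _ (by omega) (by omega) (by omega) h2 hhi
    · exact ih _ _ (by omega) h0 (by omega) hlo (by simp only [pvTri]; omega)
    · have he : hi = lo + 1 := by omega
      exact ⟨h0, hlo, he ▸ hhi⟩

lemma pvLoopA_cont (fuel : ℕ) {p t : Int} (acc : List Int) (h : p + t ≤ pvPOS_LIMIT) :
    pvLoopA (fuel + 1) p t acc = pvLoopA fuel (p + t) (t + 1) (acc ++ [p + t]) := by
  rw [pvLoopA, if_neg (by omega)]

lemma pvLoopA_stop (fuel : ℕ) {p t : Int} (acc : List Int) (h : pvPOS_LIMIT < p + t) :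
    pvLoopA (fuel + 1) p t acc = acc := by
  rw [pvLoopA, if_pos (by omega)]

lemma pv_map_range_shift (r k : Int) (n : ℕ) :
    (List.range (n + 1)).map (fun i : ℕ => r + pvTri (k + (i : Int)))
      = (r + pvTri k) :: (List.range n).map (fun i : ℕ => r + pvTri (k + 1 + (i : Int))) := by
  rw [List.range_succ_eq_map, List.map_cons, List.map_map]
  simp only [Nat.cast_zero, add_zero]
  congr 1
  apply List.map_congr_left
  intro i _
  simp only [Function.comp_apply]
  congr 2
  push_cast
  ring

-- the loop from state (p, k) with p = r + tri(k) - k emits r + tri(k+i) for i = 0..n,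
-- where n is such that r + tri(k+n) fits and r + tri(k+n+1) does not
lemma pvLoopA_run (r : Int) (n : ℕ) : ∀ (fuel : ℕ) (k p : Int) (acc : List Int),
    n + 2 ≤ fuel → 0 ≤ k →
    p = r + pvTri k - k →
    r + pvTri (k + (n : Int)) ≤ pvPOS_LIMIT →
    pvPOS_LIMIT < r + pvTri (k + (n : Int) + 1) →
    pvLoopA fuel p k acc = acc ++ (List.range (n + 1)).map (fun i : ℕ => r + pvTri (k + (i : Int))) := by
  induction n with
  | zero =>
    intro fuel k p acc hfuel hk hp hok hstop
    simp only [Nat.cast_zero, add_zero] at hok hstop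
    obtain ⟨f, rfl⟩ : ∃ f, fuel = f + 2 := ⟨fuel - 2, by omega⟩
    have hs := pvTri_succ k
    rw [show f + 2 = (f + 1) + 1 from rfl, pvLoopA_cont _ _ (by omega),
      pvLoopA_stop _ _ (by omega)]
    have hpk : p + k = r + pvTri k := by omega
    simp [hpk]
  | succ n ih =>
    intro fuel k p acc hfuel hk hp hok hstop
    simp only [Nat.cast_add, Nat.cast_one] at hok hstop
    rw [show k + ((n : Int) + 1) = k + 1 + n from by ring] at hok
    rw [show k + ((n : Int) + 1) + 1 = k + 1 + n + 1 from by ring] at hstop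
    obtain ⟨f, rfl⟩ : ∃ f, fuel = f + 1 := ⟨fuel - 1, by omega⟩
    have hs := pvTri_succ k
    have hmono : pvTri k ≤ pvTri (k + 1 + n) := pvTri_mono hk (by omega)
    rw [pvLoopA_cont _ _ (by omega)]
    have hpk : p + k = r + pvTri k := by omega
    rw [ih f (k + 1) (p + k) (acc ++ [p + k]) (by omega) (by omega) (by omega) hok hstop]
    conv_rhs => rw [pv_map_range_shift r k (n + 1)]
    simp [hpk, List.append_assoc]

-- ===== VERDICT (by name: the statement is the Claim_ definition above) =====
theorem predict_runner_poses_spec : Claim_equal_predict_runner_poses := by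
  intro r hdom
  unfold Spec_predict_runner_poses
  simp only [predict_runner_poses, predict_runner_poses_alt]
  by_cases hr : pvPOS_LIMIT - r < 0
  · rw [if_pos hr]
    obtain ⟨f, hf⟩ : ∃ f, (pvPOS_LIMIT + 1 - r).toNat + 1 = f + 1 := ⟨_, rfl⟩
    rw [hf, pvLoopA_stop _ _ (by omega)]
  · rw [if_neg hr]
    obtain ⟨hN0, hNle, hNlt⟩ :=
      pvBsearch_spec (pvPOS_LIMIT - r) (pvPOS_LIMIT - r + 1).toNat 0 (pvPOS_LIMIT - r + 1)
        (by omega) le_rfl (by omega) (by rw [pvTri_zero]; omega) (pvTri_big _ (by omega))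
    have htri := pvTri_ge_self _ hN0
    have hcast : ((pvBsearch (pvPOS_LIMIT - r + 1).toNat (pvPOS_LIMIT - r) 0 (pvPOS_LIMIT - r + 1)).toNat : Int)
        = pvBsearch (pvPOS_LIMIT - r + 1).toNat (pvPOS_LIMIT - r) 0 (pvPOS_LIMIT - r + 1) :=
      Int.toNat_of_nonneg hN0
    rw [pvLoopA_run r (pvBsearch (pvPOS_LIMIT - r + 1).toNat (pvPOS_LIMIT - r) 0 (pvPOS_LIMIT - r + 1)).toNat
        ((pvPOS_LIMIT + 1 - r).toNat + 1) 0 r [] (by omega) le_rfl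
        (by rw [pvTri_zero]; ring)
        (by rw [hcast, zero_add]; omega)
        (by rw [hcast, zero_add]; omega)]
    rw [PySem.List.pyRange_one]
    have hlen : (pvBsearch (pvPOS_LIMIT - r + 1).toNat (pvPOS_LIMIT - r) 0 (pvPOS_LIMIT - r + 1) + 1 - 0).toNat
        = (pvBsearch (pvPOS_LIMIT - r + 1).toNat (pvPOS_LIMIT - r) 0 (pvPOS_LIMIT - r + 1)).toNat + 1 := by
      omega
    rw [hlen]
    simp only [List.map_map, List.nil_append]
    apply List.map_congr_left
    intro i _
    simp only [Function.comp_apply, pvTri, zero_add]
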